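-- pv_equiv track=rewrite | github.com/YashB63/GFG-Daily-Questions | Day 360/Number of digits/number_of_digits.py | noOfDigits
-- ===== SOURCE A (Python) =====
-- def noOfDigits(N):
--     if N < 2:
--         return 1
--
--     f1 = 0
--     f2 = 1
--
--     for _ in range(2, N+1):
--         f1, f2 = f2, f1+f2
--     return len(str(f2))
-- ===== SOURCE B (Python) =====
-- def noOfDigits(N):
--     if N < 2:
--         return 1
--
--     def fib_pair(n):
--         # returns (F(n), F(n+1)) by fast doubling
--         if n == 0:
--             return (0, 1)
--         a, b = fib_pair(n >> 1)
--         c = a * (2 * b - a)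
--         d = a * a + b * b
--         if n & 1:
--             return (d, c + d)
--         return (c, d)
--
--     return len(str(fib_pair(N)[0]))
-- ===== Notes on version B (the rewrite author's own statement) =====
-- stated objective: faster
-- what changed: replaces the linear Fibonacci iteration (N additions of ever-growing numbers) with fast-doubling recursion computing F(N) in O(log N) big-int multiplications
import Mathlib
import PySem

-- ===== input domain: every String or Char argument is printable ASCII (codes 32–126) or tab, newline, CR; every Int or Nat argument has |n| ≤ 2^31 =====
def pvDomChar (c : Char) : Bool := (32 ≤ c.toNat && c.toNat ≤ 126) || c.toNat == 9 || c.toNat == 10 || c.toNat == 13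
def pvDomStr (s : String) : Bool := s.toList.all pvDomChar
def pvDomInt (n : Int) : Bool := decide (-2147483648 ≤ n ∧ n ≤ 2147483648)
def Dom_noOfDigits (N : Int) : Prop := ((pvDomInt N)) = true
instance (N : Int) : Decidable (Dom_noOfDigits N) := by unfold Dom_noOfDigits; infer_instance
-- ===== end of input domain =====

-- B replaces A's linear Fibonacci iteration by fast-doubling recursion (O(log N) big-int steps); same digit count returned.

-- ===== PORT A =====
def noOfDigits (N : Int) : Int :=
  if N < 2 then 1
  else
    let p := (PySem.List.pyRange 2 (N + 1) 1).foldl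
      (fun (s : Int × Int) _ => (s.2, s.1 + s.2)) (0, 1)
    PySem.Str.len (PySem.Int.toStr p.2)

-- ===== PORT B =====
-- fast-doubling helper: fibPair n = (F(n), F(n+1))
def fibPair : Nat → Int × Int
  | 0 => (0, 1)
  | (n + 1) =>
      let p := fibPair ((n + 1) / 2)
      let a := p.1
      let b := p.2
      let c := a * (2 * b - a)
      let d := a * a + b * b
      if (n + 1) % 2 = 1 then (d, c + d) else (c, d)
decreasing_by exact Nat.div_lt_self (Nat.succ_pos n) (by omega)

def noOfDigits_alt (N : Int) : Int :=
  if N < 2 then 1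
  else PySem.Str.len (PySem.Int.toStr (fibPair N.toNat).1)

-- ===== PRECONDITION & SPEC =====
def Spec_noOfDigits (N : Int) (out : Int) : Prop := out = noOfDigits_alt N
instance (N : Int) (out : Int) : Decidable (Spec_noOfDigits N out) := by unfold Spec_noOfDigits; infer_instance

-- ===== CLAIM =====
def Claim_equal_noOfDigits : Prop := ∀ (N : Int), Dom_noOfDigits N → Spec_noOfDigits N (noOfDigits N)

-- ===== LEMMAS AND PROOFS =====

-- fast doubling computes Fibonacci
lemma fibPair_eq (n : Nat) : fibPair n = ((Nat.fib n : Int), (Nat.fib (n + 1) : Int)) := by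
  induction n using Nat.strong_induction_on with
  | _ n ih =>
    match n with
    | 0 => simp [fibPair]
    | (m + 1) =>
      have hlt : (m + 1) / 2 < m + 1 := Nat.div_lt_self (Nat.succ_pos m) (by omega)
      have h := ih ((m + 1) / 2) hlt
      set q := (m + 1) / 2 with hq
      have hle : Nat.fib q ≤ Nat.fib (q + 1) := Nat.fib_le_fib_succ
      have h2mul : (Nat.fib (2 * q) : Int) =
          (Nat.fib q : Int) * (2 * (Nat.fib (q + 1) : Int) - (Nat.fib q : Int)) := by
        have := Nat.fib_two_mul q
        have hsub : Nat.fib q ≤ 2 * Nat.fib (q + 1) := by omega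
        push_cast [this, Nat.cast_sub hsub]
        ring
      have h2mul1 : (Nat.fib (2 * q + 1) : Int) =
          (Nat.fib q : Int) * (Nat.fib q : Int) + (Nat.fib (q + 1) : Int) * (Nat.fib (q + 1) : Int) := by
        have := Nat.fib_two_mul_add_one q
        push_cast [this]; ring
      rcases Nat.even_or_odd (m + 1) with he | ho
      · -- m + 1 = 2 * q
        have heq : m + 1 = 2 * q := by
          rcases he with ⟨t, ht⟩; omega
        have hmod : (m + 1) % 2 ≠ 1 := by omega
        rw [fibPair]
        simp only [← hq, h, if_neg hmod]
        rw [heq, h2mul, h2mul1]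
      · -- m + 1 = 2 * q + 1
        have heq : m + 1 = 2 * q + 1 := by
          rcases ho with ⟨t, ht⟩; omega
        have hmod : (m + 1) % 2 = 1 := by omega
        rw [fibPair]
        simp only [← hq, h, if_pos hmod]
        have h2q2 : (Nat.fib (2 * (q + 1)) : Int) =
            (Nat.fib (2 * q) : Int) + (Nat.fib (2 * q + 1) : Int) := by
          have : 2 * (q + 1) = (2 * q) + 2 := by omega
          rw [this, Nat.fib_add_two]; push_cast; ring
        rw [heq, show 2 * q + 1 + 1 = 2 * (q + 1) by omega, h2q2, h2mul, h2mul1]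

-- A's loop computes Fibonacci: folding over range(2, 3+k)
lemma loopA (k : Nat) :
    (PySem.List.pyRange 2 (3 + (k : Int)) 1).foldl
      (fun (s : Int × Int) _ => (s.2, s.1 + s.2)) (0, 1)
    = ((Nat.fib (k + 1) : Int), (Nat.fib (k + 2) : Int)) := by
  induction k with
  | zero => decide
  | succ k ih =>
    have hsplit : (3 : Int) + ((k + 1 : Nat) : Int) = (3 + (k : Int)) + 1 := by push_cast; ring
    rw [hsplit, PySem.List.pyRange_one_succ_right (by omega), List.foldl_append, ih]
    simp only [List.foldl_cons, List.foldl_nil]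
    have : Nat.fib (k + 1 + 2) = Nat.fib (k + 1) + Nat.fib (k + 2) := by
      rw [Nat.fib_add_two]
    rw [this]
    push_cast
    ring_nf

-- ===== VERDICT =====
theorem noOfDigits_spec : Claim_equal_noOfDigits := by
  intro N _
  unfold Spec_noOfDigits noOfDigits noOfDigits_alt
  by_cases h : N < 2
  · simp [h]
  · simp only [if_neg h]
    obtain ⟨k, hk⟩ : ∃ k : Nat, N = 2 + (k : Int) := ⟨(N - 2).toNat, by omega⟩
    have h1 : N + 1 = 3 + (k : Int) := by omega
    have h2 : N.toNat = k + 2 := by omega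
    rw [h1, h2, loopA, fibPair_eq]
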